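-- pv_equiv track=rewrite | github.com/phsria0825/Q_length_v2 | tlops-DT/tlops/tools/ClusterAnalysis.py | _redefine_labels
-- ===== SOURCE A (Python) =====
-- def _redefine_labels(labels):
--
--     '''
--     input  : [1, 1, 1, 2, 2, 2, 3, 3, 3, 2, 2, 1, 1, 3, 2]
--     output : [0, 0, 0, 1, 1, 1, 2, 2, 2, 3, 3, 4, 4, 5, 6]
--     '''
--
--     redefined, prev, new_labels = 0, labels[0], []
--     for cur in labels:
--
--         if cur != prev:
--             redefined += 1
--
--         new_labels.append(redefined)
--         prev = cur
--
--     return new_labels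
-- ===== SOURCE B (Python) =====
-- def _redefine_labels(labels):
--     # prefix-sum decomposition: pair each element with its predecessor,
--     # build 0/1 change indicators, then take running sums.
--     prevs = [labels[0]] + labels[:-1]
--     deltas = [1 if cur != prev else 0 for cur, prev in zip(labels, prevs)]
--     out, s = [], 0
--     for d in deltas:
--         s += d
--         out.append(s)
--     return out
-- ===== Notes on version B (the rewrite author's own statement) =====
-- stated objective: alternative
-- what changed: Replaces A's single stateful compare-and-count loop by a prefix-sum decomposition: zip the list with its shifted-by-one self to get 0/1 change indicators, then accumulate them into running sums.
import Mathlib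
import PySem

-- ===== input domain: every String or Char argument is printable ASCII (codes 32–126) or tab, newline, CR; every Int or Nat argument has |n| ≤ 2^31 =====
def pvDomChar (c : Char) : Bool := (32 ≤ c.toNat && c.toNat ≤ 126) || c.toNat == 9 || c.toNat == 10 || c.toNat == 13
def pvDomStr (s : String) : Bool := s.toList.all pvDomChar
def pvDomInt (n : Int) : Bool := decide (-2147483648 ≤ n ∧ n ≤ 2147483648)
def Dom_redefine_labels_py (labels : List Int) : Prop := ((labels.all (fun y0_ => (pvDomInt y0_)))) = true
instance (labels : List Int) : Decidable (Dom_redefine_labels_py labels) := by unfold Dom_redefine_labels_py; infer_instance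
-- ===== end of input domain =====

-- B replaces A's stateful compare-and-count loop by a shifted-zip of change indicators followed by a running prefix sum; same O(n) cost.

-- ===== PORT A =====
-- A's loop: state (redefined, prev, new_labels); labels[0] raises IndexError on [].
def redefine_labels_py (labels : List Int) : List Int :=
  match labels with
  | [] => []  -- unreachable under Pre_ (Python raises IndexError on labels[0])
  | l0 :: _ =>
    (labels.foldl
      (fun (st : Int × Int × List Int) cur =>
        let redefined := if cur ≠ st.2.1 then st.1 + 1 else st.1
        (redefined, cur, st.2.2 ++ [redefined]))
      (0, l0, [])).2.2

-- ===== PORT B =====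
-- B: prevs = [labels[0]] + labels[:-1]; deltas = change indicators; running sums.
def redefine_labels_py_alt (labels : List Int) : List Int :=
  match labels with
  | [] => []  -- unreachable under Pre_ (Python raises IndexError on labels[0])
  | l0 :: _ =>
    let prevs := l0 :: labels.dropLast
    let deltas := List.zipWith (fun cur prev => if cur ≠ prev then (1 : Int) else 0) labels prevs
    (deltas.foldl (fun (acc : Int × List Int) d => (acc.1 + d, acc.2 ++ [acc.1 + d])) (0, [])).2

-- ===== PRECONDITION & SPEC =====
-- Pre_ excludes only the empty list, on which A raises IndexError (labels[0]).
def Pre_redefine_labels_py (labels : List Int) : Prop := labels ≠ []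
instance (labels : List Int) : Decidable (Pre_redefine_labels_py labels) := by unfold Pre_redefine_labels_py; infer_instance
def pvWitness_redefine_labels_py : List Int := [1, 1, 2]

def Spec_redefine_labels_py (labels : List Int) (out : List Int) : Prop := out = redefine_labels_py_alt labels
instance (labels : List Int) (out : List Int) : Decidable (Spec_redefine_labels_py labels out) := by unfold Spec_redefine_labels_py; infer_instance

-- ===== CLAIM (what is proved, stated in full; the proofs are below) =====
def Claim_equal_redefine_labels_py : Prop := ∀ (labels : List Int), Dom_redefine_labels_py labels → Pre_redefine_labels_py labels → Spec_redefine_labels_py labels (redefine_labels_py labels)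

-- ===== LEMMAS AND PROOFS =====

-- the zipWith-with-predecessors list peels off one indicator per element
theorem deltas_cons (p x : Int) (xs : List Int) :
    List.zipWith (fun cur prev => if cur ≠ prev then (1 : Int) else 0) (x :: xs) (p :: (x :: xs).dropLast)
      = (if x ≠ p then (1 : Int) else 0)
        :: List.zipWith (fun cur prev => if cur ≠ prev then (1 : Int) else 0) xs (x :: xs.dropLast) := by
  cases xs with
  | nil => simp
  | cons y ys => simp [List.dropLast]

-- loop invariant: A's fold and B's accumulate agree for every start state
theorem fold_eq (xs : List Int) : ∀ (p r : Int) (acc : List Int),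
    (xs.foldl
      (fun (st : Int × Int × List Int) cur =>
        let redefined := if cur ≠ st.2.1 then st.1 + 1 else st.1
        (redefined, cur, st.2.2 ++ [redefined]))
      (r, p, acc)).2.2
    = ((List.zipWith (fun cur prev => if cur ≠ prev then (1 : Int) else 0) xs (p :: xs.dropLast)).foldl
        (fun (acc : Int × List Int) d => (acc.1 + d, acc.2 ++ [acc.1 + d])) (r, acc)).2 := by
  induction xs with
  | nil => intro p r acc; simp
  | cons x xs ih =>
    intro p r acc
    rw [deltas_cons]
    simp only [List.foldl_cons]
    have h : (if x ≠ p then r + 1 else r) = r + (if x ≠ p then (1 : Int) else 0) := by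
      split_ifs <;> simp
    simp only [h]
    exact ih x (r + (if x ≠ p then (1 : Int) else 0)) (acc ++ [r + (if x ≠ p then (1 : Int) else 0)])

-- ===== VERDICT (by name: the statement is the Claim_ definition above) =====
theorem redefine_labels_py_spec : Claim_equal_redefine_labels_py := by
  intro labels _ hpre
  unfold Spec_redefine_labels_py redefine_labels_py redefine_labels_py_alt
  cases labels with
  | nil => exact absurd rfl hpre
  | cons l0 rest => exact fold_eq (l0 :: rest) l0 0 []
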